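-- pv_equiv track=rewrite | github.com/SpehKing/eo_cd_slo | scripts/populate_database_new.py | group_files_by_grid
-- ===== SOURCE A (Python) =====
-- from typing import Optional, Dict, Any, List, Tuple
--
-- def group_files_by_grid(
--     successful_records: Dict[str, Tuple[int, int]]
-- ) -> Dict[int, List[Tuple[str, int]]]:
--     """
--     Group successfully inserted files by their grid_id
--
--     Args:
--         successful_records: Dict mapping filepath to (record_id, grid_id)
--
--     Returns:
--         Dictionary mapping grid_id to lists of (filepath, record_id) tuples
--     """
--     grid_groups = {}
--
--     for filepath, (record_id, grid_id) in successful_records.items():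
--         if grid_id not in grid_groups:
--             grid_groups[grid_id] = []
--         grid_groups[grid_id].append((filepath, record_id))
--
--     # Sort files in each group by timestamp
--     for grid_id in grid_groups:
--         grid_groups[grid_id].sort(key=lambda x: x[0])
--
--     return grid_groups
-- ===== SOURCE B (Python) =====
-- def group_files_by_grid(successful_records):
--     """
--     Group successfully inserted files by their grid_id.
--
--     One global sort by filepath replaces the per-group sorts: groups are
--     pre-created in first-occurrence order of grid_id, then a single pass over
--     the globally sorted items fills them, so each group's appends already
--     arrive in filepath order.
--     """
--     grid_groups = {grid_id: [] for (_record_id, grid_id) in successful_records.values()}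
--     for filepath, (record_id, grid_id) in sorted(successful_records.items(), key=lambda kv: kv[0]):
--         grid_groups[grid_id].append((filepath, record_id))
--     return grid_groups
-- ===== Notes on version B (the rewrite author's own statement) =====
-- stated objective: alternative
-- what changed: Instead of appending into per-grid lists and then sorting every group separately, B pre-creates the groups in first-occurrence grid order and fills them in a single pass over the items sorted once globally by filepath, so no per-group sort is needed.
import Mathlib
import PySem

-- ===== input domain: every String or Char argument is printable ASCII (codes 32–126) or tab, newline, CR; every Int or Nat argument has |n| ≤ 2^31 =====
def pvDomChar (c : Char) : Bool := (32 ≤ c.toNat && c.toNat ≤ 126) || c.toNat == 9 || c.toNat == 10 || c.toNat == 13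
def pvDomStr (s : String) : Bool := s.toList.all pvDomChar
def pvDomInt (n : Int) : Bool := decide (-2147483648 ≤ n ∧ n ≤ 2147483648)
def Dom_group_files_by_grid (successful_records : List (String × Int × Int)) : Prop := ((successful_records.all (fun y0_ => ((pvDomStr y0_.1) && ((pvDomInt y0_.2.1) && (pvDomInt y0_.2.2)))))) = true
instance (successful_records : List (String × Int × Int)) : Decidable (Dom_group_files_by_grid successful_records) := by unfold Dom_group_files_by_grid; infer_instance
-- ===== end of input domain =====

-- B fills pre-created grid groups in one pass over the items sorted once globally
-- by filepath, instead of A's per-group sorts (alternative decomposition, same cost).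


-- ===== PORT A =====
-- phase 1: append each (filepath, record_id) to grid_groups[grid_id] (created as [] if absent)
-- phase 2: for grid_id in grid_groups: grid_groups[grid_id].sort(key=lambda x: x[0])
def group_files_by_grid (successful_records : List (String × Int × Int)) : List (Int × List (String × Int)) :=
  let grid_groups : PySem.Dict Int (List (String × Int)) :=
    successful_records.foldl
      (fun d r =>
        let d := if d.contains r.2.2 then d else d.insert r.2.2 []
        d.modify r.2.2 [] (fun l => l ++ [(r.1, r.2.1)]))
      PySem.Dict.empty
  let grid_groups :=
    grid_groups.keys.foldl
      (fun d g => d.modify g [] (fun l => PySem.List.sorted l (fun x => x.1) false))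
      grid_groups
  grid_groups.items

-- ===== PORT B =====
-- pre-create groups in first-occurrence grid order, then fill from the globally
-- filepath-sorted item list
def group_files_by_grid_alt (successful_records : List (String × Int × Int)) : List (Int × List (String × Int)) :=
  let grid_groups : PySem.Dict Int (List (String × Int)) :=
    successful_records.foldl (fun d r => d.insert r.2.2 []) PySem.Dict.empty
  let grid_groups :=
    (PySem.List.sorted successful_records (fun kv => kv.1) false).foldl
      (fun d r => d.modify r.2.2 [] (fun l => l ++ [(r.1, r.2.1)]))
      grid_groups
  grid_groups.items

-- ===== PRECONDITION & SPEC =====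
-- Pre_ requires pairwise-distinct filepaths: the Python argument is a dict, whose
-- keys cannot repeat, so duplicate-filepath association lists correspond to no
-- Python input (the dict conversion silently collapses them).
def Pre_group_files_by_grid (successful_records : List (String × Int × Int)) : Prop :=
  (successful_records.map (fun r => r.1)).Nodup
instance (successful_records : List (String × Int × Int)) : Decidable (Pre_group_files_by_grid successful_records) := by unfold Pre_group_files_by_grid; infer_instance
def pvWitness_group_files_by_grid : (List (String × Int × Int)) :=
  [("b.tif", 1, 7), ("a.tif", 2, 7), ("c.tif", 3, 4)]
def Spec_group_files_by_grid (successful_records : List (String × Int × Int)) (out : List (Int × List (String × Int))) : Prop := out = group_files_by_grid_alt successful_records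
instance (successful_records : List (String × Int × Int)) (out : List (Int × List (String × Int))) : Decidable (Spec_group_files_by_grid successful_records out) := by unfold Spec_group_files_by_grid; infer_instance

-- ===== CLAIM (what is proved, stated in full; the proofs are below) =====
def Claim_equal_group_files_by_grid : Prop := ∀ (successful_records : List (String × Int × Int)), Dom_group_files_by_grid successful_records → Pre_group_files_by_grid successful_records → Spec_group_files_by_grid successful_records (group_files_by_grid successful_records)

-- ===== LEMMAS AND PROOFS =====

-- helper abbreviations and functions used only by the proofs
def pvStepA (d : PySem.Dict Int (List (String × Int))) (r : String × Int × Int) :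
    PySem.Dict Int (List (String × Int)) :=
  let d := if d.contains r.2.2 then d else d.insert r.2.2 []
  d.modify r.2.2 [] (fun l => l ++ [(r.1, r.2.1)])

def pvStepG (d : PySem.Dict Int (List (String × Int))) (r : String × Int × Int) :
    PySem.Dict Int (List (String × Int)) :=
  d.modify r.2.2 [] (fun l => l ++ [(r.1, r.2.1)])

-- (filepath, record_id) of the records of grid g, in list order
def pvProj (g : Int) (rs : List (String × Int × Int)) : List (String × Int) :=
  (rs.filter (fun r => r.2.2 == g)).map (fun r => (r.1, r.2.1))

lemma pvStepA_eq (d : PySem.Dict Int (List (String × Int))) (r : String × Int × Int) :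
    pvStepA d r = pvStepG d r := by
  unfold pvStepA pvStepG
  by_cases h : d.contains r.2.2
  · simp [h]
  · simp only [Bool.not_eq_true] at h
    simp only [h, Bool.false_eq_true, if_false, PySem.Dict.modify]
    rw [PySem.Dict.getD_insert_self, PySem.Dict.insert_insert_self,
        PySem.Dict.getD_of_not_contains _ _ h]

lemma pvFoldA_eq (rs : List (String × Int × Int)) (d : PySem.Dict Int (List (String × Int))) :
    rs.foldl pvStepA d = rs.foldl pvStepG d := by
  induction rs generalizing d with
  | nil => rfl
  | cons r rs ih => simp only [List.foldl_cons, pvStepA_eq, ih]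

lemma pvKeys_stepG (d : PySem.Dict Int (List (String × Int))) (r : String × Int × Int) :
    (pvStepG d r).keys = PySem.Set.add d.keys r.2.2 := by
  unfold pvStepG
  rw [PySem.Dict.keys_modify]
  by_cases h : d.contains r.2.2
  · rw [PySem.Dict.keys_insert_of_contains _ _ h,
        PySem.Set.add_of_mem ((PySem.Dict.contains_iff_mem_keys _ _).mp h)]
  · simp only [Bool.not_eq_true] at h
    rw [PySem.Dict.keys_insert_of_not_contains _ _ h, PySem.Set.add_of_not_mem]
    intro hm
    rw [(PySem.Dict.contains_iff_mem_keys _ _).mpr hm] at h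
    exact Bool.noConfusion h

lemma pvKeys_stepIns (d : PySem.Dict Int (List (String × Int))) (r : String × Int × Int) :
    (d.insert r.2.2 ([] : List (String × Int))).keys = PySem.Set.add d.keys r.2.2 := by
  by_cases h : d.contains r.2.2
  · rw [PySem.Dict.keys_insert_of_contains _ _ h,
        PySem.Set.add_of_mem ((PySem.Dict.contains_iff_mem_keys _ _).mp h)]
  · simp only [Bool.not_eq_true] at h
    rw [PySem.Dict.keys_insert_of_not_contains _ _ h, PySem.Set.add_of_not_mem]
    intro hm
    rw [(PySem.Dict.contains_iff_mem_keys _ _).mpr hm] at h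
    exact Bool.noConfusion h

lemma pvKeys_foldG (rs : List (String × Int × Int)) (d : PySem.Dict Int (List (String × Int))) :
    (rs.foldl pvStepG d).keys = rs.foldl (fun s r => PySem.Set.add s r.2.2) d.keys := by
  induction rs generalizing d with
  | nil => rfl
  | cons r rs ih => simp only [List.foldl_cons, ih, pvKeys_stepG]

lemma pvKeys_foldIns (rs : List (String × Int × Int)) (d : PySem.Dict Int (List (String × Int))) :
    (rs.foldl (fun d r => d.insert r.2.2 []) d).keys
      = rs.foldl (fun s r => PySem.Set.add s r.2.2) d.keys := by
  induction rs generalizing d with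
  | nil => rfl
  | cons r rs ih => simp only [List.foldl_cons, ih, pvKeys_stepIns]

lemma pvFoldAdd_ofList (rs : List (String × Int × Int)) :
    rs.foldl (fun s r => PySem.Set.add s r.2.2) [] = PySem.Set.ofList (rs.map (fun r => r.2.2)) := by
  rw [PySem.Set.ofList_eq_foldl, List.foldl_map]

lemma pvFoldAdd_of_mem (rs : List (String × Int × Int)) (s : PySem.Set Int)
    (h : ∀ r ∈ rs, r.2.2 ∈ s) :
    rs.foldl (fun s r => PySem.Set.add s r.2.2) s = s := by
  induction rs with
  | nil => rfl
  | cons r rs ih =>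
    simp only [List.foldl_cons]
    rw [PySem.Set.add_of_mem (h r (List.mem_cons_self ..))]
    exact ih (fun r hr => h r (List.mem_cons_of_mem _ hr))

lemma pvGetD_foldG (rs : List (String × Int × Int)) :
    ∀ (d : PySem.Dict Int (List (String × Int))) (g : Int),
      (rs.foldl pvStepG d).getD g [] = d.getD g [] ++ pvProj g rs := by
  induction rs with
  | nil => intro d g; simp [pvProj]
  | cons r rs ih =>
    intro d g
    simp only [List.foldl_cons]
    rw [ih]
    unfold pvStepG
    rw [PySem.Dict.getD_modify]
    by_cases h : g = r.2.2
    · subst h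
      simp [pvProj]
    · rw [if_neg h]
      have hb : (r.2.2 == g) = false := by simpa using fun hh => h hh.symm
      simp [pvProj, hb]

lemma pvGetD_foldIns (rs : List (String × Int × Int)) :
    ∀ (d : PySem.Dict Int (List (String × Int))),
      (∀ g, d.getD g [] = []) →
      ∀ g, (rs.foldl (fun d r => d.insert r.2.2 []) d).getD g [] = [] := by
  induction rs with
  | nil => intro d h g; exact h g
  | cons r rs ih =>
    intro d h g
    simp only [List.foldl_cons]
    refine ih _ (fun g' => ?_) g
    rw [PySem.Dict.getD_insert]
    split
    · rfl
    · exact h g'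

lemma pvPhase2 (ks : List Int) :
    ∀ (d : PySem.Dict Int (List (String × Int))), ks.Nodup → (∀ k ∈ ks, d.contains k = true) →
      (ks.foldl (fun d g => d.modify g [] (fun l => PySem.List.sorted l (fun x => x.1) false)) d).keys = d.keys
      ∧ ∀ g, (ks.foldl (fun d g => d.modify g [] (fun l => PySem.List.sorted l (fun x => x.1) false)) d).getD g []
          = if g ∈ ks then PySem.List.sorted (d.getD g []) (fun x => x.1) false else d.getD g [] := by
  induction ks with
  | nil => intro d _ _; exact ⟨rfl, fun g => by simp⟩
  | cons k ks ih =>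
    intro d hnd hc
    have hk : d.contains k = true := hc k (List.mem_cons_self ..)
    have hc' : ∀ k' ∈ ks, (d.modify k [] (fun l => PySem.List.sorted l (fun x => x.1) false)).contains k' = true := by
      intro k' hk'
      rw [PySem.Dict.contains_modify]
      simp [hc k' (List.mem_cons_of_mem _ hk')]
    have hnd' := hnd.of_cons
    have hknotin : k ∉ ks := (List.nodup_cons.mp hnd).1
    obtain ⟨ihk, ihg⟩ := ih _ hnd' hc'
    constructor
    · simp only [List.foldl_cons]
      rw [ihk, PySem.Dict.keys_modify, PySem.Dict.keys_insert_of_contains _ _ hk]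
    · intro g
      simp only [List.foldl_cons]
      rw [ihg g, PySem.Dict.getD_modify]
      by_cases h1 : g = k
      · subst h1
        simp [hknotin]
      · by_cases h2 : g ∈ ks <;> simp [h1, h2, List.mem_cons]

lemma pvItems_eq_keys_map (d : PySem.Dict Int (List (String × Int))) (h : d.keys.Nodup) :
    d.items = d.keys.map (fun k => (k, d.getD k [])) := by
  show d.items = (d.items.map (fun p => p.1)).map (fun k => (k, d.getD k []))
  rw [List.map_map]
  have hmc : ∀ p ∈ d.items, ((fun k => (k, d.getD k [])) ∘ fun p => p.1) p = id p := by
    intro p hp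
    have h2 : d.getD p.1 [] = p.2 :=
      PySem.Dict.getD_of_mem_items d (by simpa using hp) h _
    simp [h2]
  rw [List.map_congr_left hmc, List.map_id]

lemma pvProj_sorted (rs : List (String × Int × Int))
    (h : (rs.map (fun r => r.1)).Nodup) (g : Int) :
    pvProj g (PySem.List.sorted rs (fun kv => kv.1) false)
      = PySem.List.sorted (pvProj g rs) (fun x => x.1) false := by
  unfold pvProj
  symm
  apply PySem.List.sorted_eq_of_perm_of_pairwise_lt
  · exact ((PySem.List.sorted_perm rs (fun kv => kv.1) false).filter _).map _
  · have h1 : (PySem.List.sorted rs (fun kv => kv.1) false).Pairwise (fun a b => a.1 ≤ b.1) :=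
      PySem.List.sorted_pairwise rs (fun kv => kv.1)
    have hmapnd : ((PySem.List.sorted rs (fun kv => kv.1) false).map (fun r => r.1)).Nodup := by
      have hp := (PySem.List.sorted_perm rs (fun kv => kv.1) false).map (fun r => r.1)
      exact hp.nodup_iff.mpr h
    have h2 : (PySem.List.sorted rs (fun kv => kv.1) false).Pairwise (fun a b => a.1 ≠ b.1) := by
      simpa [List.Nodup, List.pairwise_map] using hmapnd
    have h3 : (PySem.List.sorted rs (fun kv => kv.1) false).Pairwise (fun a b => a.1 < b.1) :=
      (h1.and h2).imp (fun hab => lt_of_le_of_ne hab.1 hab.2)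
    rw [List.pairwise_map]
    exact h3.filter _

-- ===== VERDICT (by name: the statement is the Claim_ definition above) =====
theorem group_files_by_grid_spec : Claim_equal_group_files_by_grid := by
  intro rs _ hpre
  unfold Spec_group_files_by_grid group_files_by_grid group_files_by_grid_alt
  show ((List.foldl pvStepA PySem.Dict.empty rs).keys.foldl
          (fun d g => d.modify g [] (fun l => PySem.List.sorted l (fun x => x.1) false))
          (List.foldl pvStepA PySem.Dict.empty rs)).items
      = (List.foldl pvStepG
          (List.foldl (fun d r => d.insert r.2.2 []) PySem.Dict.empty rs)
          (PySem.List.sorted rs (fun kv => kv.1) false)).items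
  rw [pvFoldA_eq]
  -- phase-1 dict of A
  have hkeysP : (List.foldl pvStepG PySem.Dict.empty rs).keys
      = PySem.Set.ofList (rs.map (fun r => r.2.2)) := by
    rw [pvKeys_foldG]
    have he : (PySem.Dict.empty : PySem.Dict Int (List (String × Int))).keys = [] := rfl
    rw [he, pvFoldAdd_ofList]
  have hnodupP : (List.foldl pvStepG PySem.Dict.empty rs).keys.Nodup := by
    rw [hkeysP]; exact PySem.Set.nodup_ofList _
  have hgetP : ∀ g, (List.foldl pvStepG PySem.Dict.empty rs).getD g [] = pvProj g rs := by
    intro g; rw [pvGetD_foldG]; rfl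
  have hcontP : ∀ k ∈ (List.foldl pvStepG PySem.Dict.empty rs).keys,
      (List.foldl pvStepG PySem.Dict.empty rs).contains k = true :=
    fun k hk => (PySem.Dict.contains_iff_mem_keys _ _).mpr hk
  obtain ⟨hk2, hg2⟩ := pvPhase2 (List.foldl pvStepG PySem.Dict.empty rs).keys
      (List.foldl pvStepG PySem.Dict.empty rs) hnodupP hcontP
  -- B's initial dict
  have hkeysD0 : (List.foldl (fun d r => d.insert r.2.2 ([] : List (String × Int))) PySem.Dict.empty rs).keys
      = PySem.Set.ofList (rs.map (fun r => r.2.2)) := by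
    rw [pvKeys_foldIns]
    have he : (PySem.Dict.empty : PySem.Dict Int (List (String × Int))).keys = [] := rfl
    rw [he, pvFoldAdd_ofList]
  have hgetD0 : ∀ g, (List.foldl (fun d r => d.insert r.2.2 ([] : List (String × Int))) PySem.Dict.empty rs).getD g [] = [] :=
    pvGetD_foldIns rs PySem.Dict.empty (fun _ => rfl)
  -- B's final dict
  have hkeysQ : (List.foldl pvStepG
        (List.foldl (fun d r => d.insert r.2.2 []) PySem.Dict.empty rs)
        (PySem.List.sorted rs (fun kv => kv.1) false)).keys
      = PySem.Set.ofList (rs.map (fun r => r.2.2)) := by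
    rw [pvKeys_foldG, hkeysD0]
    apply pvFoldAdd_of_mem
    intro r hr
    have hmem : r ∈ rs := (PySem.List.sorted_perm rs (fun kv => kv.1) false).mem_iff.mp hr
    exact (PySem.Set.mem_ofList _ _).mpr (List.mem_map_of_mem hmem)
  have hnodupQ : (List.foldl pvStepG
        (List.foldl (fun d r => d.insert r.2.2 []) PySem.Dict.empty rs)
        (PySem.List.sorted rs (fun kv => kv.1) false)).keys.Nodup := by
    rw [hkeysQ]; exact PySem.Set.nodup_ofList _
  have hgetQ : ∀ g, (List.foldl pvStepG
        (List.foldl (fun d r => d.insert r.2.2 []) PySem.Dict.empty rs)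
        (PySem.List.sorted rs (fun kv => kv.1) false)).getD g []
      = PySem.List.sorted (pvProj g rs) (fun x => x.1) false := by
    intro g
    rw [pvGetD_foldG, hgetD0, List.nil_append, pvProj_sorted rs hpre g]
  -- assemble both item lists
  rw [pvItems_eq_keys_map _ (by rw [hk2]; exact hnodupP)]
  rw [pvItems_eq_keys_map _ hnodupQ]
  rw [hk2, hkeysQ, ← hkeysP]
  apply List.map_congr_left
  intro g hg
  rw [hg2 g, if_pos hg, hgetP g, hgetQ g]
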